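-- pv_equiv track=rewrite | github.com/Trottero/aoc-2023 | 15/part2.py | compute_hash
-- ===== SOURCE A (Python) =====
-- def compute_hash(input: str) -> int:
--     converted = [ord(char) for char in input]
--     val = 0
--     for char in converted:
--         val += char
--         val *= 17
--         val %= 256
--     return val
-- ===== SOURCE B (Python) =====
-- def compute_hash(input: str) -> int:
--     total = 0
--     power = 17
--     for code in [ord(c) for c in reversed(input)]:
--         total += code * power
--         power = power * 17 % 256
--     return total % 256
-- ===== Notes on version B (the rewrite author's own statement) =====
-- stated objective: alternative
-- what changed: Replaces the Horner-style fold (val = ((val+c)*17) % 256 per character) by a reverse-order polynomial evaluation: each character code is multiplied by a running power of 17 mod 256 (last char gets 17^1) and summed, with one final mod 256.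
import Mathlib
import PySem

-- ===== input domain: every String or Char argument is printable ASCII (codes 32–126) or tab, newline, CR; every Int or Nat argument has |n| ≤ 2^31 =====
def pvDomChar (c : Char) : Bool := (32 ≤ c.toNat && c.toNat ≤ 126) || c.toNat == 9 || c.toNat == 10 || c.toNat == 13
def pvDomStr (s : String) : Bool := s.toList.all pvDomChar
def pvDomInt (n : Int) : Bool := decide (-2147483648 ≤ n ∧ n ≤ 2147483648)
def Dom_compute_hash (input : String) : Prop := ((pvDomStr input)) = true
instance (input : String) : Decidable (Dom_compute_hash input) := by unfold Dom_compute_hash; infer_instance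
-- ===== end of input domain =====

-- B replaces A's Horner fold by a reverse-order polynomial sum with a running power of 17 mod 256 (alternative decomposition, same cost).

-- ===== PORT A =====
-- converted = [ord(char) for char in input]; then val = ((val + c) * 17) % 256 per character
def compute_hash (input : String) : Int :=
  (input.toList.map (fun c => (c.toNat : Int))).foldl (fun val c => (val + c) * 17 % 256) 0

-- ===== PORT B =====
-- loop over [ord(c) for c in reversed(input)]: total += code * power; power = power * 17 % 256
def pvAltLoop : List Int → Int → Int → Int
  | [], total, _ => total
  | code :: rest, total, power => pvAltLoop rest (total + code * power) (power * 17 % 256)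

def compute_hash_alt (input : String) : Int :=
  pvAltLoop (input.toList.reverse.map (fun c => (c.toNat : Int))) 0 17 % 256

-- ===== PRECONDITION & SPEC =====
def Spec_compute_hash (input : String) (out : Int) : Prop := out = compute_hash_alt input
instance (input : String) (out : Int) : Decidable (Spec_compute_hash input out) := by unfold Spec_compute_hash; infer_instance

-- ===== CLAIM (what is proved, stated in full; the proofs are below) =====
def Claim_equal_compute_hash : Prop := ∀ (input : String), Dom_compute_hash input → Spec_compute_hash input (compute_hash input)

-- ===== LEMMAS AND PROOFS =====

theorem pvCast_emod (a : Int) : ((a % 256 : Int) : ZMod 256) = (a : ZMod 256) := by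
  rw [ZMod.intCast_eq_intCast_iff]
  exact Int.emod_emod_of_dvd a dvd_rfl

-- A's Horner recurrence, viewed in ZMod 256
def pvHz : ZMod 256 → List Int → ZMod 256
  | v, [] => v
  | v, c :: cs => pvHz ((v + (c : ZMod 256)) * 17) cs

-- B's polynomial sum, viewed in ZMod 256
def pvPoly : List Int → ZMod 256 → ZMod 256
  | [], _ => 0
  | c :: cs, p => (c : ZMod 256) * p + pvPoly cs (p * 17)

theorem pvFoldA_cast (l : List Int) : ∀ v : Int,
    ((l.foldl (fun val c => (val + c) * 17 % 256) v : Int) : ZMod 256) = pvHz (v : ZMod 256) l := by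
  induction l with
  | nil => intro v; simp [pvHz]
  | cons c cs ih =>
    intro v
    simp only [List.foldl_cons, pvHz]
    rw [ih]
    congr 1
    rw [pvCast_emod]
    push_cast
    ring

theorem pvFoldA_emod (l : List Int) : ∀ v : Int, v % 256 = v →
    (l.foldl (fun val c => (val + c) * 17 % 256) v) % 256
      = l.foldl (fun val c => (val + c) * 17 % 256) v := by
  induction l with
  | nil => intro v h; simpa using h
  | cons c cs ih =>
    intro v _
    simp only [List.foldl_cons]
    exact ih _ (Int.emod_emod_of_dvd _ dvd_rfl)

theorem pvAltLoop_cast (l : List Int) : ∀ t p : Int,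
    ((pvAltLoop l t p : Int) : ZMod 256) = (t : ZMod 256) + pvPoly l (p : ZMod 256) := by
  induction l with
  | nil => intro t p; simp [pvAltLoop, pvPoly]
  | cons c cs ih =>
    intro t p
    simp only [pvAltLoop, pvPoly]
    rw [ih, pvCast_emod]
    push_cast
    ring

theorem pvPoly_smul (l : List Int) : ∀ p : ZMod 256, pvPoly l (17 * p) = 17 * pvPoly l p := by
  induction l with
  | nil => intro p; simp [pvPoly]
  | cons c cs ih =>
    intro p
    simp only [pvPoly]
    rw [show (17 : ZMod 256) * p * 17 = 17 * (p * 17) by ring, ih]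
    ring

theorem pvHz_append (l : List Int) : ∀ (v : ZMod 256) (c : Int),
    pvHz v (l ++ [c]) = (pvHz v l + (c : ZMod 256)) * 17 := by
  induction l with
  | nil => intro v c; simp [pvHz]
  | cons d ds ih => intro v c; simp only [List.cons_append, pvHz]; exact ih _ c

theorem pvHz_eq_poly (l : List Int) : pvHz 0 l = pvPoly l.reverse 17 := by
  induction l using List.reverseRecOn with
  | nil => simp [pvHz, pvPoly]
  | append_singleton l c ih =>
    rw [pvHz_append, ih, List.reverse_append]
    simp only [List.reverse_singleton, List.singleton_append, pvPoly]
    rw [show (17 : ZMod 256) * 17 = 17 * 17 from rfl, pvPoly_smul]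
    ring

theorem pvMain (l : List Int) :
    l.foldl (fun val c => (val + c) * 17 % 256) 0 = pvAltLoop l.reverse 0 17 % 256 := by
  have h0 : (0 : Int) % 256 = 0 := by decide
  rw [← pvFoldA_emod l 0 h0]
  have hcast : ((l.foldl (fun val c => (val + c) * 17 % 256) 0 : Int) : ZMod 256)
      = ((pvAltLoop l.reverse 0 17 : Int) : ZMod 256) := by
    rw [pvFoldA_cast, pvAltLoop_cast]
    push_cast
    rw [pvHz_eq_poly]
    ring
  have := (ZMod.intCast_eq_intCast_iff _ _ _).mp hcast
  exact this

-- ===== VERDICT (by name: the statement is the Claim_ definition above) =====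
theorem compute_hash_spec : Claim_equal_compute_hash := by
  intro input _
  unfold Spec_compute_hash compute_hash compute_hash_alt
  rw [List.map_reverse]
  exact pvMain _
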